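-- pv_equiv track=rewrite | github.com/shoaibwaqar665/virtus_media_analysis | discord_parser.py | count_messages_after
-- ===== SOURCE A (Python) =====
-- def count_messages_after(message_id, all_messages):
--     """
--     Count the number of messages sent after a specific message ID
--     """
--     found_message = False
--     count = 0
--
--     for message in all_messages:
--         if message['message_id'] == message_id:
--             found_message = True
--             continue
--         if found_message:
--             count += 1
--
--     return count if found_message else -1
-- ===== SOURCE B (Python) =====
-- def count_messages_after(message_id, all_messages):
--     """
--     Count the number of messages sent after a specific message ID
--     """
--     try:
--         idx = next(i for i, m in enumerate(all_messages)
--                    if m['message_id'] == message_id)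
--     except StopIteration:
--         return -1
--     return sum(1 for m in all_messages[idx + 1:]
--                if m['message_id'] != message_id)
-- ===== Notes on version B (the rewrite author's own statement) =====
-- stated objective: alternative
-- what changed: Replaces A's single pass with a boolean flag and running counter by a two-phase decomposition: find the index of the first matching message with enumerate/next, then count non-matching messages in the suffix slice with sum of a generator.
import Mathlib
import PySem

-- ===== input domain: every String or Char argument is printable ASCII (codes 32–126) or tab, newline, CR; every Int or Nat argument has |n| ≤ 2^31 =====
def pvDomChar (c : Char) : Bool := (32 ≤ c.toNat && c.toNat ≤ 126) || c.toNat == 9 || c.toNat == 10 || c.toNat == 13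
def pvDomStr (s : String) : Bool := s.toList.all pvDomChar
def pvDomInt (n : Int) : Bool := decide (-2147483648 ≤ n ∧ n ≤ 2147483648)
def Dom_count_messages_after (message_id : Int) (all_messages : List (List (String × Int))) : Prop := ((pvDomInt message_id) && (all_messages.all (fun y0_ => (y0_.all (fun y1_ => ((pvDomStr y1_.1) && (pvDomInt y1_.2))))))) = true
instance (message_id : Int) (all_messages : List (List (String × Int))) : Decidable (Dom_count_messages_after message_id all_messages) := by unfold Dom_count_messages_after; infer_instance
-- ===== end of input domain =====

-- B does the same task by a two-phase decomposition (find first index, then count the suffix)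
-- instead of A's one pass with a found-flag; same O(n) cost, different structure.

-- shared dict-lookup primitive: m['message_id'] (first match; value defaulted, Pre_ guarantees presence)
def pyMsgId (m : List (String × Int)) : Int :=
  ((m.find? (fun p => p.1 == "message_id")).map (·.2)).getD 0

-- ===== PORT A =====
def count_messages_after (message_id : Int) (all_messages : List (List (String × Int))) : Int :=
  let st := all_messages.foldl (fun (s : Bool × Int) m =>
    if pyMsgId m == message_id then (true, s.2)
    else if s.1 then (s.1, s.2 + 1) else s) (false, 0)
  if st.1 then st.2 else -1

-- ===== PORT B =====
def count_messages_after_alt (message_id : Int) (all_messages : List (List (String × Int))) : Int :=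
  match all_messages.findIdx? (fun m => pyMsgId m == message_id) with
  | none => -1
  | some i => (((all_messages.drop (i + 1)).filter (fun m => !(pyMsgId m == message_id))).length : Int)

-- ===== PRECONDITION & SPEC =====
-- Pre_ excludes exactly the inputs where A raises KeyError: some message lacks the 'message_id' key.
def Pre_count_messages_after (message_id : Int) (all_messages : List (List (String × Int))) : Prop :=
  all_messages.all (fun m => m.any (fun p => p.1 == "message_id")) = true
instance (message_id : Int) (all_messages : List (List (String × Int))) : Decidable (Pre_count_messages_after message_id all_messages) := by unfold Pre_count_messages_after; infer_instance
def pvWitness_count_messages_after : Int × (List (List (String × Int))) :=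
  (2, [[("message_id", 1)], [("message_id", 2)], [("message_id", 3)], [("message_id", 2)], [("message_id", 4)]])

def Spec_count_messages_after (message_id : Int) (all_messages : List (List (String × Int))) (out : Int) : Prop := out = count_messages_after_alt message_id all_messages
instance (message_id : Int) (all_messages : List (List (String × Int))) (out : Int) : Decidable (Spec_count_messages_after message_id all_messages out) := by unfold Spec_count_messages_after; infer_instance

-- ===== CLAIM (what is proved, stated in full; the proofs are below) =====
def Claim_equal_count_messages_after : Prop := ∀ (message_id : Int) (all_messages : List (List (String × Int))), Dom_count_messages_after message_id all_messages → Pre_count_messages_after message_id all_messages → Spec_count_messages_after message_id all_messages (count_messages_after message_id all_messages)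

-- ===== LEMMAS AND PROOFS =====

-- once A's flag is set, the fold just adds the number of non-matching remaining messages
lemma foldA_true (message_id : Int) :
    ∀ (l : List (List (String × Int))) (c : Int),
      l.foldl (fun (s : Bool × Int) m =>
        if pyMsgId m == message_id then (true, s.2)
        else if s.1 then (s.1, s.2 + 1) else s) (true, c)
      = (true, c + ((l.filter (fun m => !(pyMsgId m == message_id))).length : Int)) := by
  intro l
  induction l with
  | nil => intro c; simp
  | cons m t ih =>
    intro c
    rw [List.foldl_cons]
    by_cases h : pyMsgId m == message_id
    · rw [if_pos h, ih, List.filter_cons_of_neg (by simp [h])]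
    · rw [if_neg (by simp [h]), if_pos rfl, ih, List.filter_cons_of_pos (by simp [h])]
      simp only [Prod.mk.injEq, List.length_cons, true_and]
      push_cast
      ring

theorem count_messages_after_eq (message_id : Int) (all_messages : List (List (String × Int))) :
    count_messages_after message_id all_messages = count_messages_after_alt message_id all_messages := by
  induction all_messages with
  | nil => rfl
  | cons m t ih =>
    by_cases h : pyMsgId m == message_id
    · show (if _ then _ else _) = _
      rw [List.foldl_cons, if_pos h, foldA_true, if_pos rfl]
      rw [count_messages_after_alt, List.findIdx?_cons, if_pos h]
      simp
    · have hstep : (fun (s : Bool × Int) m =>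
          if pyMsgId m == message_id then (true, s.2)
          else if s.1 then (s.1, s.2 + 1) else s) ((false : Bool), (0 : Int)) m = (false, 0) := by
        simp [h]
      have hA : count_messages_after message_id (m :: t) = count_messages_after message_id t := by
        simp only [count_messages_after, List.foldl_cons, hstep]
      have hB : count_messages_after_alt message_id (m :: t) = count_messages_after_alt message_id t := by
        rw [count_messages_after_alt, count_messages_after_alt, List.findIdx?_cons, if_neg (by simp [h])]
        cases t.findIdx? (fun m => pyMsgId m == message_id) with
        | none => rfl
        | some i => rfl
      rw [hA, hB, ih]

-- ===== VERDICT (by name: the statement is the Claim_ definition above) =====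
theorem count_messages_after_spec : Claim_equal_count_messages_after := by
  intro message_id all_messages _ _
  exact count_messages_after_eq message_id all_messages
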